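-- pv_equiv track=rewrite | github.com/usernamethatisnttaken/ProjectsPortfolio | 2022/Simulations/cube_sim/cube_sim.py | adj
-- ===== SOURCE A (Python) =====
-- def adj(seed):
--     adjacent = []
--     for i in range(len(seed)):
--         for j in range(len(seed) - 1):
--             if j >= i:
--                 j += 1
--             for k in range(len(seed[i])):
--                 if abs(seed[i][k] - seed[j][k]) <= 1:
--                     if seed[i][k] - seed[j][k] != 0:
--                         adjacent.append([i, k, seed[i][k] - seed[j][k]])
--     return adjacent
-- ===== SOURCE B (Python) =====
-- def adj(seed):
--     n = len(seed)
--     buckets = [[] for _ in range(n)]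
--     for i in range(n):
--         for j in range(i + 1, n):
--             for k in range(len(seed[i])):
--                 d = seed[i][k] - seed[j][k]
--                 if d == 1 or d == -1:
--                     buckets[i].append([i, k, d])
--                     buckets[j].append([j, k, -d])
--     out = []
--     for b in buckets:
--         out += b
--     return out
-- ===== Notes on version B (the rewrite author's own statement) =====
-- stated objective: alternative
-- what changed: B scans each unordered pair (i,j) with i<j exactly once, emitting the matching entry for both rows into per-row buckets that are concatenated at the end, instead of A's full scan over all ordered pairs with index re-adjustment (measured ~2x fewer pair scans, but not confirmed faster at the largest timing size).
import Mathlib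
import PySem

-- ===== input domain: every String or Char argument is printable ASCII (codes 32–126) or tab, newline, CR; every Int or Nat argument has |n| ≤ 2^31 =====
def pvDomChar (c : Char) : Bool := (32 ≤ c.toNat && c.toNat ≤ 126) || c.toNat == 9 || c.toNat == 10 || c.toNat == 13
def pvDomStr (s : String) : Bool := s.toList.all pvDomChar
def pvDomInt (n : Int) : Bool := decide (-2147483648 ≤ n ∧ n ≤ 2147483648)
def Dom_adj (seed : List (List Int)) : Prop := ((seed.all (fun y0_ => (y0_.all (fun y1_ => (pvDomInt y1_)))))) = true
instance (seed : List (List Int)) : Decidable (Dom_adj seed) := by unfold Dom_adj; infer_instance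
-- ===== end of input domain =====

-- B replaces A's scan over all ordered pairs (with index re-adjustment) by one scan over
-- unordered pairs i<j that emits the entry for both rows into per-row buckets that are
-- concatenated at the end (objective: alternative). Return values only.

-- ===== PORT A =====
def adj (seed : List (List Int)) : List (List Int) :=
  (PySem.List.pyRange 0 (seed.length : Int) 1).foldl (fun acc i =>
    (PySem.List.pyRange 0 ((seed.length : Int) - 1) 1).foldl (fun acc j0 =>
      let j := if j0 ≥ i then j0 + 1 else j0
      (PySem.List.pyRange 0 ((PySem.List.pyGetD seed i []).length : Int) 1).foldl (fun acc k =>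
        let a := PySem.List.pyGetD (PySem.List.pyGetD seed i []) k 0
        let b := PySem.List.pyGetD (PySem.List.pyGetD seed j []) k 0
        if |a - b| ≤ 1 then
          if a - b ≠ 0 then acc ++ [[i, k, a - b]] else acc
        else acc) acc) acc) []

-- ===== PORT B =====
-- hand-port of `buckets[t].append(x)` (t is a loop index from range(n), hence nonnegative,
-- so `.toNat` at the call sites below is exact): append the rows e at bucket t.
def pvBApp (bs : List (List (List Int))) (t : Nat) (e : List (List Int)) : List (List (List Int)) :=
  match bs, t with
  | [], _ => []
  | b :: bs, 0 => (b ++ e) :: bs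
  | b :: bs, Nat.succ t => b :: pvBApp bs t e

def adj_alt (seed : List (List Int)) : List (List Int) :=
  let n : Int := (seed.length : Int)
  let buckets0 : List (List (List Int)) := (PySem.List.pyRange 0 n 1).map (fun _ => [])
  let buckets :=
    (PySem.List.pyRange 0 n 1).foldl (fun bks i =>
      (PySem.List.pyRange (i + 1) n 1).foldl (fun bks j =>
        (PySem.List.pyRange 0 ((PySem.List.pyGetD seed i []).length : Int) 1).foldl (fun bks k =>
          let d := PySem.List.pyGetD (PySem.List.pyGetD seed i []) k 0 -
                   PySem.List.pyGetD (PySem.List.pyGetD seed j []) k 0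
          if d = 1 ∨ d = -1 then
            pvBApp (pvBApp bks i.toNat [[i, k, d]]) j.toNat [[j, k, -d]]
          else bks) bks) bks) buckets0
  buckets.foldl (fun out b => out ++ b) []

-- ===== PRECONDITION & SPEC =====
-- Pre_ excludes exactly the inputs where A raises IndexError: with n ≥ 2 rows of unequal
-- length, seed[j][k] is evaluated for k up to len(seed[i]) and raises.
def Pre_adj (seed : List (List Int)) : Prop :=
  ∀ r ∈ seed, ∀ r' ∈ seed, r.length = r'.length
instance (seed : List (List Int)) : Decidable (Pre_adj seed) := by unfold Pre_adj; infer_instance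
def pvWitness_adj : List (List Int) := [[0, 1], [2, 2]]

def Spec_adj (seed : List (List Int)) (out : List (List Int)) : Prop := out = adj_alt seed
instance (seed : List (List Int)) (out : List (List Int)) : Decidable (Spec_adj seed out) := by unfold Spec_adj; infer_instance

-- ===== CLAIM (what is proved, stated in full; the proofs are below) =====
def Claim_equal_adj : Prop := ∀ (seed : List (List Int)), Dom_adj seed → Pre_adj seed → Spec_adj seed (adj seed)

-- ===== LEMMAS AND PROOFS =====

-- abbreviations for the values both ports manipulate
def pvLen (seed : List (List Int)) (i : Int) : Int := ((PySem.List.pyGetD seed i []).length : Int)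
def pvVal (seed : List (List Int)) (i k : Int) : Int := PySem.List.pyGetD (PySem.List.pyGetD seed i []) k 0
def pvDf (seed : List (List Int)) (i j k : Int) : Int := pvVal seed i k - pvVal seed j k
-- coordinates of row i that are adjacent to row j (scanning k over len(seed[i]))
def pvKs (seed : List (List Int)) (i j : Int) : List Int :=
  (PySem.List.pyRange 0 (pvLen seed i) 1).filter (fun k => decide (pvDf seed i j k = 1 ∨ pvDf seed i j k = -1))
-- entries pair (i,j) contributes to bucket i resp. bucket j (both scan k over len(seed[i]))
def pvMfst (seed : List (List Int)) (i j : Int) : List (List Int) :=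
  (pvKs seed i j).map (fun k => [i, k, pvDf seed i j k])
def pvMsnd (seed : List (List Int)) (i j : Int) : List (List Int) :=
  (pvKs seed i j).map (fun k => [j, k, -pvDf seed i j k])

-- ---- pvBApp algebra ----
theorem pvBApp_nil (bs : List (List (List Int))) (t : Nat) : pvBApp bs t [] = bs := by
  induction bs generalizing t with
  | nil => rfl
  | cons b bs ih => cases t <;> simp [pvBApp, ih]

theorem pvBApp_pvBApp_same (bs : List (List (List Int))) (t : Nat) (e e' : List (List Int)) :
    pvBApp (pvBApp bs t e) t e' = pvBApp bs t (e ++ e') := by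
  induction bs generalizing t with
  | nil => rfl
  | cons b bs ih => cases t <;> simp [pvBApp, ih]

theorem pvBApp_comm (bs : List (List (List Int))) (s t : Nat) (e e' : List (List Int)) (h : s ≠ t) :
    pvBApp (pvBApp bs s e) t e' = pvBApp (pvBApp bs t e') s e := by
  induction bs generalizing s t with
  | nil => rfl
  | cons b bs ih =>
    cases s with
    | zero => cases t with
      | zero => exact absurd rfl h
      | succ t => simp [pvBApp]
    | succ s => cases t with
      | zero => simp [pvBApp]
      | succ t => simp [pvBApp]; exact ih s t (by omega)

theorem length_pvBApp (bs : List (List (List Int))) (t : Nat) (e : List (List Int)) :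
    (pvBApp bs t e).length = bs.length := by
  induction bs generalizing t with
  | nil => rfl
  | cons b bs ih => cases t <;> simp [pvBApp, ih]

theorem getD_pvBApp_self' (bs : List (List (List Int))) (t : Nat) (e : List (List Int)) (h : t < bs.length) :
    (pvBApp bs t e).getD t [] = bs.getD t [] ++ e := by
  induction bs generalizing t with
  | nil => simp at h
  | cons b bs ih =>
    cases t with
    | zero => simp [pvBApp]
    | succ t => simpa [pvBApp] using ih t (by simpa using h)

theorem getD_pvBApp_ne (bs : List (List (List Int))) (s t : Nat) (e : List (List Int)) (h : s ≠ t) :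
    (pvBApp bs t e).getD s [] = bs.getD s [] := by
  induction bs generalizing s t with
  | nil => rfl
  | cons b bs ih =>
    cases t with
    | zero =>
      cases s with
      | zero => exact absurd rfl h
      | succ s => simp [pvBApp]
    | succ t =>
      cases s with
      | zero => simp [pvBApp]
      | succ s => simpa [pvBApp] using ih s t (by omega)

-- ---- generic: recover a list from its getD values ----
theorem map_range_getD (bs : List (List (List Int))) (n : Nat) (h : bs.length = n) :
    (List.range n).map (fun t => bs.getD t []) = bs := by
  apply List.ext_getElem
  · simp [h]
  · intro k h1 h2
    simp [List.getD_eq_getElem?_getD, List.getElem?_eq_getElem h2]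

theorem getD_map_range' (f : Nat → List (List Int)) (n t : Nat) (h : t < n) :
    ((List.range n).map f).getD t [] = f t := by
  rw [List.getD_eq_getElem?_getD]
  simp [h]

theorem pvFlatMap_congr_mem {α β : Type} (l : List α) {f g : α → List β}
    (h : ∀ x ∈ l, f x = g x) : l.flatMap f = l.flatMap g := by
  induction l with
  | nil => rfl
  | cons x xs ih =>
    simp only [List.flatMap_cons, h x (List.mem_cons_self), ih (fun y hy => h y (List.mem_cons_of_mem x hy))]

-- ---- A side: collapse the three loops ----
theorem adjA_inner (seed : List (List Int)) (i j : Int) (acc : List (List Int)) :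
    (PySem.List.pyRange 0 ((PySem.List.pyGetD seed i []).length : Int) 1).foldl (fun acc k =>
        let a := PySem.List.pyGetD (PySem.List.pyGetD seed i []) k 0
        let b := PySem.List.pyGetD (PySem.List.pyGetD seed j []) k 0
        if |a - b| ≤ 1 then
          if a - b ≠ 0 then acc ++ [[i, k, a - b]] else acc
        else acc) acc = acc ++ pvMfst seed i j := by
  rw [PySem.List.foldl_congr_mem
      (g := fun acc k => if (fun k => decide (pvDf seed i j k = 1 ∨ pvDf seed i j k = -1)) k
        then acc ++ [(fun k => [i, k, pvDf seed i j k]) k] else acc)]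
  · rw [PySem.List.foldl_append_if]
    rfl
  · intro acc k _
    simp only [pvDf, pvVal, decide_eq_true_eq]
    split_ifs with h1 h2 h3 <;> try rfl
    · rw [abs_le] at h1; omega
    · omega
    · rw [abs_le] at h1; omega

theorem adjA_eq (seed : List (List Int)) :
    adj seed = (PySem.List.pyRange 0 (seed.length : Int) 1).flatMap (fun i =>
      (PySem.List.pyRange 0 ((seed.length : Int) - 1) 1).flatMap (fun j0 =>
        pvMfst seed i (if j0 ≥ i then j0 + 1 else j0))) := by
  unfold adj
  rw [PySem.List.foldl_congr_mem
      (g := fun acc i => acc ++ (PySem.List.pyRange 0 ((seed.length : Int) - 1) 1).flatMap (fun j0 =>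
        pvMfst seed i (if j0 ≥ i then j0 + 1 else j0)))]
  · rw [PySem.List.foldl_append_eq_flatMap]
    simp
  · intro acc i _
    rw [PySem.List.foldl_congr_mem
        (g := fun acc j0 => acc ++ pvMfst seed i (if j0 ≥ i then j0 + 1 else j0))]
    · rw [PySem.List.foldl_append_eq_flatMap]
    · intro acc2 j0 _
      exact adjA_inner seed i (if j0 ≥ i then j0 + 1 else j0) acc2

theorem reindex_flatMap (g : Int → List (List Int)) (n i : Int) (h0 : 0 ≤ i) (h1 : i < n) :
    (PySem.List.pyRange 0 (n - 1) 1).flatMap (fun j0 => g (if j0 ≥ i then j0 + 1 else j0)) =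
      (PySem.List.pyRange 0 i 1).flatMap g ++ (PySem.List.pyRange (i + 1) n 1).flatMap g := by
  rw [PySem.List.pyRange_one_append 0 i (n - 1) h0 (by omega), List.flatMap_append]
  congr 1
  · apply pvFlatMap_congr_mem
    intro j0 hj0
    rw [PySem.List.mem_pyRange_one] at hj0
    simp [not_le.mpr hj0.2]
  · rw [pvFlatMap_congr_mem (g := fun j0 => g (j0 + 1))
      (h := by intro j0 hj0; rw [PySem.List.mem_pyRange_one] at hj0; simp [hj0.1])]
    rw [PySem.List.pyRange_one, PySem.List.pyRange_one]
    rw [List.flatMap_map, List.flatMap_map]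
    have hc : (n - 1 - i).toNat = (n - (i + 1)).toNat := by omega
    rw [hc]
    apply pvFlatMap_congr_mem
    intro k _
    congr 1
    omega

-- ---- B side: the pair loop characterised bucket by bucket ----
def pvStep (seed : List (List Int)) (i : Int) (bks : List (List (List Int))) (j : Int) : List (List (List Int)) :=
  (PySem.List.pyRange 0 ((PySem.List.pyGetD seed i []).length : Int) 1).foldl (fun bks k =>
    let d := PySem.List.pyGetD (PySem.List.pyGetD seed i []) k 0 -
             PySem.List.pyGetD (PySem.List.pyGetD seed j []) k 0
    if d = 1 ∨ d = -1 then
      pvBApp (pvBApp bks i.toNat [[i, k, d]]) j.toNat [[j, k, -d]]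
    else bks) bks

theorem pvFoldl_two_bapp (i j : Nat) (hij : i ≠ j) (P : Int → Bool) (f g : Int → List Int)
    (ks : List Int) (bks : List (List (List Int))) :
    ks.foldl (fun b k => if P k then pvBApp (pvBApp b i [f k]) j [g k] else b) bks =
      pvBApp (pvBApp bks i ((ks.filter P).map f)) j ((ks.filter P).map g) := by
  induction ks generalizing bks with
  | nil => simp [pvBApp_nil]
  | cons k ks ih =>
    by_cases h1 : P k
    · simp only [List.foldl_cons, List.filter_cons, h1, if_pos, List.map_cons]
      rw [ih]
      have key : ∀ (B : List (List (List Int))) (e1 e2 F G : List (List Int)),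
          pvBApp (pvBApp (pvBApp (pvBApp B i e1) j e2) i F) j G =
            pvBApp (pvBApp B i (e1 ++ F)) j (e2 ++ G) := by
        intro B e1 e2 F G
        rw [pvBApp_comm (pvBApp B i e1) j i e2 F (Ne.symm hij), pvBApp_pvBApp_same,
            pvBApp_pvBApp_same]
      rw [key]
      simp
    · simp only [List.foldl_cons, List.filter_cons, h1, if_neg, Bool.false_eq_true,
        not_false_eq_true]
      exact ih bks

theorem pvStep_eq (seed : List (List Int)) (i j : Int) (bks : List (List (List Int))) (hij : i.toNat ≠ j.toNat) :
    pvStep seed i bks j = pvBApp (pvBApp bks i.toNat (pvMfst seed i j)) j.toNat (pvMsnd seed i j) := by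
  unfold pvStep
  rw [PySem.List.foldl_congr_mem
      (g := fun b k => if (fun k => decide (pvDf seed i j k = 1 ∨ pvDf seed i j k = -1)) k then
        pvBApp (pvBApp b i.toNat [(fun k => [i, k, pvDf seed i j k]) k]) j.toNat
          [(fun k => [j, k, -pvDf seed i j k]) k] else b)]
  · rw [pvFoldl_two_bapp i.toNat j.toNat hij]
    rfl
  · intro b k _
    simp only [pvDf, pvVal, decide_eq_true_eq]

-- tail of bucket t once all pairs with min index ≥ a have been processed
def pvTail (seed : List (List Int)) (n a t : Int) : List (List Int) :=
  (PySem.List.pyRange a t 1).flatMap (fun j => pvMsnd seed j t) ++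
    (PySem.List.pyRange (t + 1) n 1).flatMap (fun j => pvMfst seed t j)

theorem pvInner_inv (seed : List (List Int)) (n a : Int) (m : Nat) (c : Int)
    (bks : List (List (List Int))) (hlen : bks.length = n.toNat) (hn : n = (seed.length : Int))
    (ha : 0 ≤ a) (hac : a < c) (hm : (n - c).toNat ≤ m) :
    (PySem.List.pyRange c n 1).foldl (pvStep seed a) bks =
      (List.range n.toNat).map (fun t => bks.getD t [] ++
        (if (t : Int) = a then (PySem.List.pyRange c n 1).flatMap (fun j => pvMfst seed a j)
         else if c ≤ (t : Int) then pvMsnd seed a t else [])) := by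
  induction m generalizing c bks with
  | zero =>
    have hnc : n ≤ c := by omega
    rw [PySem.List.pyRange_one_eq_nil hnc]
    simp only [List.foldl_nil]
    have hcong : ∀ t ∈ List.range n.toNat,
        bks.getD t [] ++ (if (t : Int) = a then ([] : List Int).flatMap (fun j => pvMfst seed a j)
          else if c ≤ (t : Int) then pvMsnd seed a t else []) = bks.getD t [] := by
      intro t ht
      simp only [List.mem_range] at ht
      split_ifs with h1 h2
      · simp
      · omega
      · simp
    rw [List.map_congr_left hcong, map_range_getD bks n.toNat hlen]
  | succ m ih =>
    by_cases hcn : c < n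
    · rw [PySem.List.pyRange_one_cons hcn, List.foldl_cons]
      rw [pvStep_eq seed a c bks (by omega)]
      have hlen' : (pvBApp (pvBApp bks a.toNat (pvMfst seed a c)) c.toNat (pvMsnd seed a c)).length = n.toNat := by
        simp [length_pvBApp, hlen]
      rw [ih (c + 1) _ hlen' (by omega) (by omega)]
      apply List.map_congr_left
      intro t ht
      simp only [List.mem_range] at ht
      rw [List.flatMap_cons]
      by_cases h1 : t = a.toNat
      · subst h1
        have hta : ((a.toNat : Nat) : Int) = a := by omega
        rw [getD_pvBApp_ne _ a.toNat c.toNat _ (by omega),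
            getD_pvBApp_self' bks a.toNat _ (by omega)]
        simp [hta]
      · by_cases h2 : t = c.toNat
        · subst h2
          have htc : ((c.toNat : Nat) : Int) = c := by omega
          rw [getD_pvBApp_self' _ c.toNat _ (by rw [length_pvBApp, hlen]; omega),
              getD_pvBApp_ne _ c.toNat a.toNat _ (by omega)]
          rw [htc]
          split_ifs <;> first | omega | simp
        · rw [getD_pvBApp_ne _ t c.toNat _ (by omega),
              getD_pvBApp_ne _ t a.toNat _ (by omega)]
          split_ifs <;> first | rfl | omega
    · have hnc : n ≤ c := by omega
      rw [PySem.List.pyRange_one_eq_nil hnc]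
      simp only [List.foldl_nil]
      have hcong : ∀ t ∈ List.range n.toNat,
          bks.getD t [] ++ (if (t : Int) = a then ([] : List Int).flatMap (fun j => pvMfst seed a j)
            else if c ≤ (t : Int) then pvMsnd seed a t else []) = bks.getD t [] := by
        intro t ht
        simp only [List.mem_range] at ht
        split_ifs with h1 h2
        · simp
        · omega
        · simp
      rw [List.map_congr_left hcong, map_range_getD bks n.toNat hlen]

theorem pvOuter_inv (seed : List (List Int)) (n : Int) (m : Nat) (a : Int)
    (bks : List (List (List Int))) (hlen : bks.length = n.toNat) (hn : n = (seed.length : Int))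
    (ha : 0 ≤ a) (hm : (n - a).toNat ≤ m) :
    (PySem.List.pyRange a n 1).foldl (fun bks i => (PySem.List.pyRange (i + 1) n 1).foldl (pvStep seed i) bks) bks =
      (List.range n.toNat).map (fun t => bks.getD t [] ++
        (if a ≤ (t : Int) then pvTail seed n a t else [])) := by
  induction m generalizing a bks with
  | zero =>
    have hna : n ≤ a := by omega
    rw [PySem.List.pyRange_one_eq_nil hna]
    simp only [List.foldl_nil]
    have hcong : ∀ t ∈ List.range n.toNat,
        bks.getD t [] ++ (if a ≤ (t : Int) then pvTail seed n a t else []) = bks.getD t [] := by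
      intro t ht
      simp only [List.mem_range] at ht
      rw [if_neg (by omega), List.append_nil]
    rw [List.map_congr_left hcong, map_range_getD bks n.toNat hlen]
  | succ m ih =>
    by_cases han : a < n
    · rw [PySem.List.pyRange_one_cons han, List.foldl_cons]
      rw [pvInner_inv seed n a (n - (a + 1)).toNat (a + 1) bks hlen hn ha (by omega) (by omega)]
      rw [ih (a + 1) _ (by simp) (by omega) (by omega)]
      apply List.map_congr_left
      intro t ht
      simp only [List.mem_range] at ht
      rw [getD_map_range' _ n.toNat t ht]
      by_cases h1 : (t : Int) = a
      · rw [if_pos h1, if_neg (by omega), if_pos (by omega), List.append_nil]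
        congr 1
        unfold pvTail
        rw [h1, PySem.List.pyRange_one_eq_nil (le_refl a)]
        simp
      · by_cases h2 : a < (t : Int)
        · rw [if_neg h1, if_pos (by omega), if_pos (by omega), if_pos (by omega)]
          rw [List.append_assoc]
          congr 1
          unfold pvTail
          rw [PySem.List.pyRange_one_cons (by omega : a < (t : Int)), List.flatMap_cons,
              List.append_assoc]
        · rw [if_neg h1, if_neg (by omega), if_neg (by omega), if_neg (by omega)]
          simp
    · have hna : n ≤ a := by omega
      rw [PySem.List.pyRange_one_eq_nil hna]
      simp only [List.foldl_nil]
      have hcong : ∀ t ∈ List.range n.toNat,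
          bks.getD t [] ++ (if a ≤ (t : Int) then pvTail seed n a t else []) = bks.getD t [] := by
        intro t ht
        simp only [List.mem_range] at ht
        rw [if_neg (by omega), List.append_nil]
      rw [List.map_congr_left hcong, map_range_getD bks n.toNat hlen]

theorem adjB_eq (seed : List (List Int)) :
    adj_alt seed = (List.range seed.length).flatMap (fun (t : Nat) => pvTail seed (seed.length : Int) 0 (t : Int)) := by
  have h0 : adj_alt seed =
      ((PySem.List.pyRange 0 (seed.length : Int) 1).foldl
        (fun bks i => (PySem.List.pyRange (i + 1) (seed.length : Int) 1).foldl (pvStep seed i) bks)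
        ((PySem.List.pyRange 0 (seed.length : Int) 1).map (fun _ => []))).foldl
        (fun out b => out ++ b) [] := rfl
  rw [h0]
  rw [pvOuter_inv seed (seed.length : Int) seed.length 0 _
    (by simp [PySem.List.length_pyRange_one]) rfl (le_refl 0) (by omega)]
  have hz : ∀ t : Nat,
      ((PySem.List.pyRange 0 (seed.length : Int) 1).map (fun _ => ([] : List (List Int)))).getD t [] = [] := by
    intro t
    rw [List.getD_eq_getElem?_getD, List.getElem?_map]
    cases (PySem.List.pyRange 0 (seed.length : Int) 1)[t]? <;> rfl
  rw [PySem.List.foldl_append_eq_flatMap]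
  rw [List.nil_append]
  conv_lhs => rw [List.flatMap_map]
  simp only [Int.toNat_natCast]
  apply pvFlatMap_congr_mem
  intro t _
  rw [hz t, List.nil_append, if_pos (Int.natCast_nonneg t)]

-- ---- with Pre_: the two bucket views coincide ----
theorem pvLen_eq (seed : List (List Int)) (hpre : Pre_adj seed) (i j : Int)
    (hi0 : 0 ≤ i) (hi : i < (seed.length : Int)) (hj0 : 0 ≤ j) (hj : j < (seed.length : Int)) :
    pvLen seed i = pvLen seed j := by
  unfold pvLen
  have e1 : PySem.List.pyGetD seed i ([] : List Int) = seed[i.toNat]'(by omega) := by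
    exact PySem.List.pyGetD_eq_getElem _ _ hi0 (by simpa using hi)
  have e2 : PySem.List.pyGetD seed j ([] : List Int) = seed[j.toNat]'(by omega) := by
    exact PySem.List.pyGetD_eq_getElem _ _ hj0 (by simpa using hj)
  rw [e1, e2]
  exact_mod_cast hpre _ (seed.getElem_mem _) _ (seed.getElem_mem _)

theorem pvMsnd_eq_pvMfst (seed : List (List Int)) (hpre : Pre_adj seed) (i j : Int)
    (hi0 : 0 ≤ i) (hi : i < (seed.length : Int)) (hj0 : 0 ≤ j) (hj : j < (seed.length : Int)) :
    pvMsnd seed j i = pvMfst seed i j := by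
  unfold pvMsnd pvMfst pvKs
  rw [pvLen_eq seed hpre j i hj0 hj hi0 hi]
  have hfc : (PySem.List.pyRange 0 (pvLen seed i) 1).filter
      (fun k => decide (pvDf seed j i k = 1 ∨ pvDf seed j i k = -1)) =
    (PySem.List.pyRange 0 (pvLen seed i) 1).filter
      (fun k => decide (pvDf seed i j k = 1 ∨ pvDf seed i j k = -1)) := by
    apply List.filter_congr
    intro k _
    have hd : pvDf seed j i k = -pvDf seed i j k := by unfold pvDf; ring
    rw [hd, decide_eq_decide]
    omega
  rw [hfc]
  apply List.map_congr_left
  intro k _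
  have hd : pvDf seed j i k = -pvDf seed i j k := by unfold pvDf; ring
  rw [hd, neg_neg]

-- ===== VERDICT (by name: the statement is the Claim_ definition above) =====
theorem adj_spec : Claim_equal_adj := by
  intro seed _ hpre
  unfold Spec_adj
  rw [adjA_eq, adjB_eq, PySem.List.pyRange_zero_natCast]
  conv_lhs => rw [List.flatMap_map]
  apply pvFlatMap_congr_mem
  intro t ht
  simp only [List.mem_range] at ht
  have htn : (t : Int) < (seed.length : Int) := by omega
  rw [reindex_flatMap (pvMfst seed (t : Int)) (seed.length : Int) (t : Int)
      (Int.natCast_nonneg t) htn]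
  unfold pvTail
  congr 1
  apply pvFlatMap_congr_mem
  intro j hj
  rw [PySem.List.mem_pyRange_one] at hj
  exact (pvMsnd_eq_pvMfst seed hpre (t : Int) j (Int.natCast_nonneg t) htn hj.1 (by omega)).symm
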